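-- pv_equiv track=rewrite | github.com/mike-liuliu/Min-Max-Jump-distance | mmj_functions.py | len_centers_idx
-- ===== SOURCE A (Python) =====
-- def len_centers_idx(centers_idx):
--
--     K = len(centers_idx)
--     qq = K
--     ppp = [set(centers_idx[ii]) for ii in range(K)]
--
--     for i in range(K):
--         for j in range(K):
--             if i < j:
--                 if ppp[j] == ppp[i]:
--                     qq -= 1
--     return qq
-- ===== SOURCE B (Python) =====
-- def len_centers_idx(centers_idx):
--     qq = len(centers_idx)
--     cnt = {}
--     for lst in centers_idx:
--         k = tuple(sorted(set(lst)))
--         c = cnt.get(k, 0)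
--         qq -= c
--         cnt[k] = c + 1
--     return qq
-- ===== Notes on version B (the rewrite author's own statement) =====
-- stated objective: alternative
-- what changed: Replaced the all-pairs set-equality scan by a single pass that canonicalises each list to a sorted-deduplicated key and subtracts, per element, the count of earlier equal keys kept in a dictionary.
import Mathlib
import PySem

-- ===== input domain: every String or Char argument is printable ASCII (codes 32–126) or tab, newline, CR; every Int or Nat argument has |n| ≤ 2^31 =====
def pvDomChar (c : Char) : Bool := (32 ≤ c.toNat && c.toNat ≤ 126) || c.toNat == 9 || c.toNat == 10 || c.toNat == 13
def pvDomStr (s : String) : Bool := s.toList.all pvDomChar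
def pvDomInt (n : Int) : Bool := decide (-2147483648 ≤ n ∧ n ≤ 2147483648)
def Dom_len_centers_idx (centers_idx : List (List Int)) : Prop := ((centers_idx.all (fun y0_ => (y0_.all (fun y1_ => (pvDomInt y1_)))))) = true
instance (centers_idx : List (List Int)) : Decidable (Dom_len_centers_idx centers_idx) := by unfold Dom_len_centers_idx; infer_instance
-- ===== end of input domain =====

-- B replaces A's all-pairs set-equality scan by a single pass with a dictionary of
-- canonical (sorted, deduplicated) keys, subtracting the count of earlier equal keys.

-- ===== PORT A =====
def len_centers_idx (centers_idx : List (List Int)) : Int :=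
  let K : Int := (centers_idx.length : Int)
  let ppp : List (PySem.Set Int) :=
    (PySem.List.pyRange 0 K).map (fun ii => PySem.Set.ofList (PySem.List.pyGetD centers_idx ii []))
  (PySem.List.pyRange 0 K).foldl (fun qq i =>
    (PySem.List.pyRange 0 K).foldl (fun qq j =>
      if i < j then
        (if PySem.Set.equal (PySem.List.pyGetD ppp j []) (PySem.List.pyGetD ppp i []) then qq - 1
         else qq)
      else qq) qq) K

-- ===== PORT B =====
-- tuple(sorted(set(lst))) — the canonical key of a list
def pvKey (lst : List Int) : List Int :=
  PySem.List.sorted (PySem.Set.ofList lst) (fun x => x)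

def len_centers_idx_alt (centers_idx : List (List Int)) : Int :=
  (centers_idx.foldl
    (fun (s : Int × PySem.Dict (List Int) Int) lst =>
      let k := pvKey lst
      let c := s.2.getD k 0
      (s.1 - c, s.2.insert k (c + 1)))
    ((centers_idx.length : Int), PySem.Dict.empty)).1

-- ===== PRECONDITION & SPEC =====
def Spec_len_centers_idx (centers_idx : List (List Int)) (out : Int) : Prop := out = len_centers_idx_alt centers_idx
instance (centers_idx : List (List Int)) (out : Int) : Decidable (Spec_len_centers_idx centers_idx out) := by unfold Spec_len_centers_idx; infer_instance

-- ===== CLAIM (what is proved, stated in full; the proofs are below) =====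
def Claim_equal_len_centers_idx : Prop := ∀ (centers_idx : List (List Int)), Dom_len_centers_idx centers_idx → Spec_len_centers_idx centers_idx (len_centers_idx centers_idx)

-- ===== LEMMAS AND PROOFS =====

-- For each element, the number of LATER elements equal to it (under eqb), summed.
def pvAR {α : Type} (eqb : α → α → Bool) : List α → Int
  | [] => 0
  | k :: t => ((t.countP (fun a => eqb a k) : Nat) : Int) + pvAR eqb t

-- For each element, the number of EARLIER elements equal to it (prefix p first), summed.
def pvCp (p : List (List Int)) : List (List Int) → Int
  | [] => 0
  | k :: t => (p.count k : Int) + pvCp (p ++ [k]) t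

-- sum of an ite (-1)/0 over a list is minus a countP
theorem pv_sum_ite_neg {α : Type} (p : α → Bool) (l : List α) :
    (l.map (fun x => if p x then (-1 : Int) else 0)).sum = -((l.countP p : Nat) : Int) := by
  induction l with
  | nil => simp
  | cons a t ih =>
    by_cases h : p a <;> simp [h, ih]

theorem pv_sum_neg {α : Type} (l : List α) (f : α → Int) :
    (l.map (fun x => -(f x))).sum = -((l.map f).sum) := by
  induction l with
  | nil => simp
  | cons a t ih => simp [ih]; ring

-- countP over indices = countP over the list
theorem pv_countP_range_getD {α : Type} (p : α → Bool) (d : α) (t : List α) :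
    (List.range t.length).countP (fun j => p (t.getD j d)) = t.countP p := by
  induction t with
  | nil => simp
  | cons a t ih =>
    rw [List.length_cons, List.range_succ_eq_map]
    have e : ((fun j => p ((a :: t).getD j d)) ∘ Nat.succ) = fun j => p (t.getD j d) := by
      funext j; simp [Nat.succ_eq_add_one]
    rw [List.countP_cons, List.countP_map, e, ih, List.countP_cons]
    simp

-- map over indices = map over the list
theorem pv_map_range_getD {α β : Type} (f : α → β) (d : α) (t : List α) :
    (List.range t.length).map (fun j => f (t.getD j d)) = t.map f := by
  induction t with
  | nil => simp
  | cons a t ih =>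
    rw [List.length_cons, List.range_succ_eq_map, List.map_cons, List.map_map]
    have e : ((fun j => f ((a :: t).getD j d)) ∘ Nat.succ) = fun j => f (t.getD j d) := by
      funext j; simp [Nat.succ_eq_add_one]
    rw [e, ih]
    simp

-- A's double index loop counts, for each i, the later j with eqb ks[j] ks[i]
theorem pv_dc {α : Type} (eqb : α → α → Bool) (d : α) (ks : List α) :
    ((List.range ks.length).map (fun i => (((List.range ks.length).countP
      (fun j => decide (i < j) && eqb (ks.getD j d) (ks.getD i d)) : Nat) : Int))).sum
    = pvAR eqb ks := by
  induction ks with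
  | nil => simp [pvAR]
  | cons k t ih =>
    rw [List.length_cons, List.range_succ_eq_map]
    rw [List.map_cons, List.sum_cons, List.map_map]
    have h0 : ((0 :: (List.range t.length).map Nat.succ).countP
        (fun j => decide (0 < j) && eqb ((k :: t).getD j d) ((k :: t).getD 0 d)) : Nat)
        = t.countP (fun a => eqb a k) := by
      rw [List.countP_cons, List.countP_map]
      have e : ((fun j => decide (0 < j) && eqb ((k :: t).getD j d) ((k :: t).getD 0 d)) ∘ Nat.succ)
          = fun j => (fun a => eqb a k) (t.getD j d) := by
        funext j; simp [Nat.succ_eq_add_one]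
      rw [e, pv_countP_range_getD (fun a => eqb a k) d t]
      simp
    have h1 : ∀ i : Nat, ((0 :: (List.range t.length).map Nat.succ).countP
        (fun j => decide (i + 1 < j) && eqb ((k :: t).getD j d) ((k :: t).getD (i + 1) d)) : Nat)
        = (List.range t.length).countP (fun j => decide (i < j) && eqb (t.getD j d) (t.getD i d)) := by
      intro i
      rw [List.countP_cons, List.countP_map]
      have e : ((fun j => decide (i + 1 < j) && eqb ((k :: t).getD j d) ((k :: t).getD (i + 1) d)) ∘ Nat.succ)
          = fun j => decide (i < j) && eqb (t.getD j d) (t.getD i d) := by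
        funext j; simp [Nat.succ_eq_add_one]
      rw [e]
      simp
    have hmap : (List.range t.length).map
        ((fun i => (((0 :: (List.range t.length).map Nat.succ).countP
          (fun j => decide (i < j) && eqb ((k :: t).getD j d) ((k :: t).getD i d)) : Nat) : Int)) ∘ Nat.succ)
        = (List.range t.length).map (fun i => (((List.range t.length).countP
          (fun j => decide (i < j) && eqb (t.getD j d) (t.getD i d)) : Nat) : Int)) := by
      apply List.map_congr_left
      intro i _
      simp only [Function.comp_apply, Nat.succ_eq_add_one]
      rw [h1 i]
    rw [hmap, ih, h0, pvAR]

-- canonical keys are equal iff the Python sets are equal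
theorem pv_keyEq (a b : List Int) :
    PySem.Set.equal (PySem.Set.ofList a) (PySem.Set.ofList b) = true ↔ pvKey a = pvKey b := by
  constructor
  · intro h
    have hmem := (PySem.Set.equal_iff _ _).mp h
    have hperm : (PySem.Set.ofList b).Perm (PySem.Set.ofList a) := by
      rw [List.perm_ext_iff_of_nodup (PySem.Set.nodup_ofList b) (PySem.Set.nodup_ofList a)]
      intro x; exact (hmem x).symm
    unfold pvKey
    refine PySem.List.sorted_id_eq_of_perm_of_pairwise _ _ ?_ ?_
    · exact (PySem.List.sorted_perm (PySem.Set.ofList b) (fun x => x) false).trans hperm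
    · exact PySem.List.sorted_pairwise (PySem.Set.ofList b) (fun x => x)
  · intro h
    rw [PySem.Set.equal_iff]
    intro x
    have h1 : x ∈ pvKey a ↔ x ∈ PySem.Set.ofList a := PySem.List.mem_sorted _ _ _ x
    have h2 : x ∈ pvKey b ↔ x ∈ PySem.Set.ofList b := PySem.List.mem_sorted _ _ _ x
    rw [← h1, ← h2, h]

theorem pv_keyEq_bool (a b : List Int) :
    PySem.Set.equal (PySem.Set.ofList a) (PySem.Set.ofList b) = (pvKey a == pvKey b) := by
  rw [Bool.eq_iff_iff, pv_keyEq, beq_iff_eq]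

-- pvAR over sets = pvAR over canonical keys
theorem pv_AR_bridge (l : List (List Int)) :
    pvAR (fun a b => PySem.Set.equal a b) (l.map PySem.Set.ofList)
    = pvAR (fun a b => a == b) (l.map pvKey) := by
  induction l with
  | nil => rfl
  | cons k t ih =>
    simp only [List.map_cons, pvAR, ih, List.countP_map]
    congr 2
    apply List.countP_congr
    intro y _
    simp only [Function.comp_apply]
    rw [pv_keyEq_bool y k]

-- shifting the prefix of pvCp adds the prefix counts
theorem pv_cp_shift (l : List (List Int)) : ∀ p : List (List Int),
    pvCp p l = pvCp [] l + (l.map (fun x => (p.count x : Int))).sum := by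
  induction l with
  | nil => simp [pvCp]
  | cons k t ih =>
    intro p
    simp only [pvCp, List.map_cons, List.sum_cons, List.nil_append, List.count_nil, Nat.cast_zero]
    rw [ih (p ++ [k]), ih [k]]
    have hsplit : (t.map (fun x => ((p ++ [k]).count x : Int))).sum
        = (t.map (fun x => (p.count x : Int))).sum
          + (t.map (fun x => (([k] : List (List Int)).count x : Int))).sum := by
      rw [← PySem.List.sum_map_add_int]
      apply congrArg
      apply List.map_congr_left
      intro x _
      rw [List.count_append]; push_cast; ring
    rw [hsplit]
    ring

-- pvCp with empty prefix = pvAR with list equality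
theorem pv_cp_AR (l : List (List Int)) :
    pvCp [] l = pvAR (fun a b => a == b) l := by
  induction l with
  | nil => rfl
  | cons k t ih =>
    simp only [pvCp, pvAR, List.nil_append, List.count_nil, Nat.cast_zero]
    rw [pv_cp_shift t [k], ih]
    have hone : (t.map (fun x => (([k] : List (List Int)).count x : Int))).sum
        = ((t.countP (fun a => a == k) : Nat) : Int) := by
      rw [show (fun x => (([k] : List (List Int)).count x : Int))
          = (fun x => if (x == k) then (1 : Int) else 0) by
        funext x
        rw [List.count_singleton]
        by_cases h : x = k
        · subst h; simp
        · have h1 : (k == x) = false := by simp [Ne.symm h]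
          have h2 : (x == k) = false := by simp [h]
          simp [h1, h2]]
      exact PySem.List.sum_map_ite_one_zero _ t
    rw [hone]
    ring

-- B's loop invariant: if the dict holds the counts of prefix p, the fold subtracts pvCp p l
theorem pv_bloop (l : List (List Int)) : ∀ (p : List (List Int)) (q : Int) (dct : PySem.Dict (List Int) Int),
    (∀ k, dct.getD k 0 = (p.count k : Int)) →
    ((l.foldl (fun s k => (s.1 - s.2.getD k 0, s.2.insert k (s.2.getD k 0 + 1))) (q, dct)).1 : Int)
    = q - pvCp p l := by
  induction l with
  | nil => intro p q dct _; simp [pvCp]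
  | cons k t ih =>
    intro p q dct hd
    simp only [List.foldl_cons, pvCp]
    rw [ih (p ++ [k]) (q - dct.getD k 0) _ ?_]
    · rw [hd k]; ring
    · intro k'
      rw [PySem.Dict.getD_insert]
      by_cases h : k' = k
      · subst h
        rw [hd k', List.count_append, List.count_singleton]
        simp
      · simp only [if_neg h]
        rw [hd k', List.count_append, List.count_singleton]
        have hne : (k == k') = false := by simp [Ne.symm h]
        simp [hne]

-- B in closed form
theorem pv_B_eq (l : List (List Int)) :
    len_centers_idx_alt l = (l.length : Int) - pvAR (fun a b => a == b) (l.map pvKey) := by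
  unfold len_centers_idx_alt
  have hm : l.foldl
      (fun (s : Int × PySem.Dict (List Int) Int) lst =>
        (s.1 - s.2.getD (pvKey lst) 0, s.2.insert (pvKey lst) (s.2.getD (pvKey lst) 0 + 1)))
      ((l.length : Int), PySem.Dict.empty)
      = (l.map pvKey).foldl (fun s k => (s.1 - s.2.getD k 0, s.2.insert k (s.2.getD k 0 + 1)))
      ((l.length : Int), PySem.Dict.empty) := by
    rw [List.foldl_map]
  rw [show (fun (s : Int × PySem.Dict (List Int) Int) lst =>
        let k := pvKey lst
        let c := s.2.getD k 0
        (s.1 - c, s.2.insert k (c + 1)))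
      = (fun (s : Int × PySem.Dict (List Int) Int) lst =>
        (s.1 - s.2.getD (pvKey lst) 0, s.2.insert (pvKey lst) (s.2.getD (pvKey lst) 0 + 1))) from rfl]
  rw [hm, pv_bloop (l.map pvKey) [] _ _ (by intro k; simp [PySem.Dict.getD_empty]), pv_cp_AR]

-- A in closed form
theorem pv_A_eq (l : List (List Int)) :
    len_centers_idx l = (l.length : Int) - pvAR (fun a b => PySem.Set.equal a b) (l.map PySem.Set.ofList) := by
  unfold len_centers_idx
  simp only [PySem.List.pyRange_zero_natCast, List.foldl_map, List.map_map, Function.comp_def,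
    PySem.List.pyGetD_natCast, Nat.cast_lt]
  rw [pv_map_range_getD PySem.Set.ofList ([] : List Int) l]
  have hdc := pv_dc (fun a b => PySem.Set.equal a b) ([] : PySem.Set Int) (l.map PySem.Set.ofList)
  simp only [List.length_map] at hdc
  have hinner : ∀ (q : Int) (i : Nat),
      (List.range l.length).foldl (fun q j => if i < j then
        (if PySem.Set.equal ((l.map PySem.Set.ofList).getD j []) ((l.map PySem.Set.ofList).getD i [])
         then q - 1 else q) else q) q
      = q - (((List.range l.length).countP (fun j => decide (i < j)
          && PySem.Set.equal ((l.map PySem.Set.ofList).getD j []) ((l.map PySem.Set.ofList).getD i [])) : Nat) : Int) := by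
    intro q i
    rw [PySem.List.foldl_congr_mem (List.range l.length) _
      (fun q j => q + (if decide (i < j)
          && PySem.Set.equal ((l.map PySem.Set.ofList).getD j []) ((l.map PySem.Set.ofList).getD i [])
        then (-1 : Int) else 0)) q ?_]
    · rw [PySem.List.foldl_add, pv_sum_ite_neg]; ring
    · intro acc j _
      by_cases h1 : i < j
      · by_cases h2 : PySem.Set.equal ((l.map PySem.Set.ofList).getD j []) ((l.map PySem.Set.ofList).getD i []) = true
        · have hb : (decide (i < j) && PySem.Set.equal ((l.map PySem.Set.ofList).getD j []) ((l.map PySem.Set.ofList).getD i [])) = true := by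
            rw [h2, decide_eq_true h1]; rfl
          beta_reduce
          rw [if_pos h1, if_pos h2, if_pos hb]; ring
        · have hb : ¬((decide (i < j) && PySem.Set.equal ((l.map PySem.Set.ofList).getD j []) ((l.map PySem.Set.ofList).getD i [])) = true) := by
            rw [Bool.and_eq_true]; exact fun hh => h2 hh.2
          beta_reduce
          rw [if_pos h1, if_neg h2, if_neg hb]; ring
      · have hb : ¬((decide (i < j) && PySem.Set.equal ((l.map PySem.Set.ofList).getD j []) ((l.map PySem.Set.ofList).getD i [])) = true) := by
          rw [Bool.and_eq_true]; exact fun hh => h1 (of_decide_eq_true hh.1)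
        beta_reduce
        rw [if_neg h1, if_neg hb]; ring
  rw [PySem.List.foldl_congr_mem (List.range l.length) _
    (fun q i => q + (-((((List.range l.length).countP (fun j => decide (i < j)
        && PySem.Set.equal ((l.map PySem.Set.ofList).getD j []) ((l.map PySem.Set.ofList).getD i [])) : Nat) : Int))))
    ((l.length : Int)) ?_]
  · rw [PySem.List.foldl_add, pv_sum_neg, hdc]; ring
  · intro acc i _
    rw [hinner acc i]; ring

-- ===== VERDICT (by name: the statement is the Claim_ definition above) =====
theorem len_centers_idx_spec : Claim_equal_len_centers_idx := by
  intro l _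
  unfold Spec_len_centers_idx
  rw [pv_A_eq, pv_B_eq, pv_AR_bridge]
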